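-- pv_equiv track=rewrite | github.com/SA-Inc/Contest-Tasks | Codewars/Backspaces in string.py | clean_string
-- ===== SOURCE A (Python) =====
-- def clean_string(s):
--     stack = []
--
--     for i in range(len(s)):
--         if ((len(stack) > 0) and (s[i] == '#')):
--             stack.pop()
--         elif ((len(stack) == 0) and (s[i] == '#')):
--             continue
--         else:
--             stack.append(s[i])
--
--     return ''.join([str(elem) for elem in stack])
-- ===== SOURCE B (Python) =====
-- def clean_string(s):
--     skip = 0
--     out = []
--     for ch in reversed(s):
--         if ch == '#':
--             skip += 1
--         elif skip > 0:
--             skip -= 1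
--         else:
--             out.append(ch)
--     out.reverse()
--     return ''.join(out)
-- ===== Notes on version B (the rewrite author's own statement) =====
-- stated objective: faster
-- what changed: Replaces the left-to-right index-based stack scan (push/pop per character, list comprehension join) with a single right-to-left scan keeping only an integer skip counter of pending backspaces, appending kept characters and reversing once at the end.
import Mathlib
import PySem

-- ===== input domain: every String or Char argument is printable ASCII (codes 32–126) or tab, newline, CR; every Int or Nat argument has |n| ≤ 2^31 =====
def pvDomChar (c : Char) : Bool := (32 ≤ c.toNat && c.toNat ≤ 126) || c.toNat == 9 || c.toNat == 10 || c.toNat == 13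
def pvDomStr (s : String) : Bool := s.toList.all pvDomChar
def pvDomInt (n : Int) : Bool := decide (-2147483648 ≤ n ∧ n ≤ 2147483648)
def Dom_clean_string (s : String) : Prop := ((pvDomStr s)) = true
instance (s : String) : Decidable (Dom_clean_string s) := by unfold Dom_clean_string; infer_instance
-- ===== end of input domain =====

-- B replaces A's left-to-right stack scan with a right-to-left scan keeping a skip counter (alternative decomposition, same cost).


-- ===== PORT A =====
-- loop 'for i in range(len(s))' over the characters, maintaining the stack
def cleanLoopA (chars : List Char) (stack : List Char) : List Char :=
  match chars with
  | [] => stack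
  | c :: t =>
    if stack.length > 0 ∧ c = '#' then cleanLoopA t stack.dropLast
    else if stack.length = 0 ∧ c = '#' then cleanLoopA t stack
    else cleanLoopA t (stack ++ [c])

def clean_string (s : String) : String := String.ofList (cleanLoopA s.toList [])

-- ===== PORT B =====
-- right-to-left scan with a skip counter; kept chars collected then reversed
def cleanLoopB (chars : List Char) (skip : Nat) (out : List Char) : List Char :=
  match chars with
  | [] => out
  | c :: t =>
    if c = '#' then cleanLoopB t (skip + 1) out
    else if skip > 0 then cleanLoopB t (skip - 1) out
    else cleanLoopB t skip (out ++ [c])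

def clean_string_alt (s : String) : String :=
  String.ofList (cleanLoopB s.toList.reverse 0 []).reverse

-- ===== PRECONDITION & SPEC =====
def Spec_clean_string (s : String) (out : String) : Prop := out = clean_string_alt s
instance (s : String) (out : String) : Decidable (Spec_clean_string s out) := by unfold Spec_clean_string; infer_instance

-- ===== CLAIM (what is proved, stated in full; the proofs are below) =====
def Claim_equal_clean_string : Prop := ∀ (s : String), Dom_clean_string s → Spec_clean_string s (clean_string s)

-- ===== LEMMAS AND PROOFS =====

-- one step of A's stack update
def pvStep (st : List Char) (c : Char) : List Char :=
  if c = '#' then st.dropLast else st ++ [c]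

theorem cleanLoopA_eq_foldl (l : List Char) : ∀ st, cleanLoopA l st = l.foldl pvStep st := by
  induction l with
  | nil => intro st; rfl
  | cons c t ih =>
    intro st
    simp only [cleanLoopA, List.foldl, pvStep]
    by_cases hc : c = '#'
    · cases st with
      | nil => simp [hc, ih]
      | cons a st' => simp [hc, ih]
    · simp [hc, ih]

theorem cleanLoopB_acc (l : List Char) : ∀ skip out, cleanLoopB l skip out = out ++ cleanLoopB l skip [] := by
  induction l with
  | nil => intro skip out; simp [cleanLoopB]
  | cons c t ih =>
    intro skip out
    simp only [cleanLoopB]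
    split
    · exact ih _ _
    · split
      · exact ih _ _
      · rw [ih _ (out ++ [c]), ih _ ([] ++ [c])]; simp

theorem key (l : List Char) : ∀ skip,
    (cleanLoopB l skip []).reverse = List.dropLast^[skip] (l.reverse.foldl pvStep []) := by
  induction l with
  | nil => intro skip; simp only [cleanLoopB, List.reverse_nil, List.foldl_nil]; exact (Function.iterate_fixed rfl skip).symm
  | cons c t ih =>
    intro skip
    have hfold : (c :: t).reverse.foldl pvStep ([] : List Char)
        = pvStep (t.reverse.foldl pvStep []) c := by
      simp [List.foldl_append]
    rw [hfold]
    simp only [cleanLoopB]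
    by_cases hc : c = '#'
    · rw [if_pos hc, ih (skip + 1)]
      simp [pvStep, hc, Function.iterate_succ_apply]
    · simp only [if_neg hc]
      by_cases hs : skip > 0
      · simp only [if_pos hs]
        rw [ih (skip - 1)]
        have : skip = (skip - 1) + 1 := by omega
        rw [this, Function.iterate_succ_apply]
        simp [pvStep, hc]
      · have hz : skip = 0 := by omega
        simp only [if_neg hs]
        rw [cleanLoopB_acc, hz]
        simp [ih 0, pvStep, hc]

-- ===== VERDICT (by name: the statement is the Claim_ definition above) =====
theorem clean_string_spec : Claim_equal_clean_string := by
  intro s _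
  unfold Spec_clean_string clean_string clean_string_alt
  rw [cleanLoopA_eq_foldl, key]
  simp
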